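-- pv_equiv track=rewrite | github.com/Sreeshks/cuehub | cuehub/Logo/LOGO.py | apply_color
-- ===== SOURCE A (Python) =====
-- RED = "\033[31m"     # Red color for 'e'
--
-- GREY = "\033[90m"    # Light grey color for 'a'
--
-- RESET = "\033[0m"    # Reset color
--
-- def apply_color(ascii_str):
--     # Apply red color to 'e' and light grey to 'a', leaving other characters as they are
--     colored_str = ""
--     for char in ascii_str:
--         if char == '+':
--             colored_str += f"{RED}{char}{RESET}"  # Apply red to 'e'
--         elif char == '*':
--             colored_str += f"{GREY}{char}{RESET}"  # Apply light grey to 'a'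
--         else:
--             colored_str += char
--     return colored_str
-- ===== SOURCE B (Python) =====
-- RED = "\033[31m"
-- GREY = "\033[90m"
-- RESET = "\033[0m"
--
-- def apply_color(ascii_str):
--     # Two chained replace passes; the ANSI codes contain no '+' or '*', so
--     # the passes cannot interfere and the result matches the per-char loop.
--     return ascii_str.replace('+', f"{RED}+{RESET}").replace('*', f"{GREY}*{RESET}")
-- ===== Notes on version B (the rewrite author's own statement) =====
-- stated objective: simpler
-- what changed: Replaced the per-character accumulation loop with two chained str.replace passes (non-interfering since the ANSI codes contain no '+' or '*').
import Mathlib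
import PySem

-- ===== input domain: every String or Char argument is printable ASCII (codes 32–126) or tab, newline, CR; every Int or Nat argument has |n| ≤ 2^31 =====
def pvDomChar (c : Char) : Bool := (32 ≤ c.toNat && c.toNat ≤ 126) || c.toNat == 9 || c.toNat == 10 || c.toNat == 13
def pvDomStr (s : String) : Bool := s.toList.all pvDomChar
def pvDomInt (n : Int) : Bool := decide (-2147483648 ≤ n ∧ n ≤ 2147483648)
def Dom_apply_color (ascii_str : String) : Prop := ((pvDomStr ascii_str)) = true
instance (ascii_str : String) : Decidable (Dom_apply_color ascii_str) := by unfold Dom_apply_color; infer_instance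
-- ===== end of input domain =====

-- ===== PORT A =====
-- B replaces the per-character accumulation loop with two chained replace passes (objective: simpler).
def pvRED : List Char := ['\x1B', '[', '3', '1', 'm']
def pvGREY : List Char := ['\x1B', '[', '9', '0', 'm']
def pvRESET : List Char := ['\x1B', '[', '0', 'm']

def apply_color (ascii_str : String) : String :=
  String.ofList (ascii_str.toList.foldl (fun colored_str char =>
    if char = '+' then colored_str ++ (pvRED ++ [char] ++ pvRESET)
    else if char = '*' then colored_str ++ (pvGREY ++ [char] ++ pvRESET)
    else colored_str ++ [char]) [])

-- ===== PORT B =====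
def apply_color_alt (ascii_str : String) : String :=
  PySem.Str.replace (PySem.Str.replace ascii_str "+" "\x1B[31m+\x1B[0m") "*" "\x1B[90m*\x1B[0m"

-- ===== PRECONDITION & SPEC =====
def Spec_apply_color (ascii_str : String) (out : String) : Prop := out = apply_color_alt ascii_str
instance (ascii_str : String) (out : String) : Decidable (Spec_apply_color ascii_str out) := by unfold Spec_apply_color; infer_instance

-- ===== CLAIM (what is proved, stated in full; the proofs are below) =====
def Claim_equal_apply_color : Prop := ∀ (ascii_str : String), Dom_apply_color ascii_str → Spec_apply_color ascii_str (apply_color ascii_str)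

-- ===== LEMMAS AND PROOFS =====

-- single-character substitution written as a flatMap
def pvSub (c : Char) (new : List Char) (l : List Char) : List Char :=
  l.flatMap (fun x => if x = c then new else [x])

-- Chars.replace with a one-character pattern is exactly pvSub
lemma replace_go_single (c : Char) (new : List Char) :
    ∀ (l : List Char) (fuel : Nat) (acc : List Char), l.length ≤ fuel →
      PySem.Chars.replace.go [c] new fuel l acc = acc.reverse ++ pvSub c new l := by
  intro l
  induction l with
  | nil =>
      intro fuel acc _
      cases fuel <;> simp [PySem.Chars.replace.go, pvSub]
  | cons c' t ih =>
      intro fuel acc hle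
      cases fuel with
      | zero => simp at hle
      | succ k =>
          by_cases h : c' = c
          · subst h
            simp only [PySem.Chars.replace.go]
            rw [if_pos (by simp [List.isPrefixOf])]
            simp only [List.length_cons, List.length_nil, List.drop_succ_cons, List.drop_zero]
            rw [ih k (new.reverse ++ acc) (by simpa using hle)]
            simp [pvSub]
          · simp only [PySem.Chars.replace.go]
            rw [if_neg (by simp [List.isPrefixOf]; exact fun hh => h hh.symm)]
            rw [ih k (c' :: acc) (by simpa using hle)]
            simp [pvSub, h]

lemma replace_single (c : Char) (new l : List Char) :
    PySem.Chars.replace l [c] new = pvSub c new l := by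
  simp only [PySem.Chars.replace, List.isEmpty_cons, Bool.false_eq_true, if_false]
  simpa using replace_go_single c new l l.length [] le_rfl

-- the per-character coloring of A, as a function
def pvColor (char : Char) : List Char :=
  if char = '+' then pvRED ++ [char] ++ pvRESET
  else if char = '*' then pvGREY ++ [char] ++ pvRESET
  else [char]

-- A's accumulation loop computes the flatMap of pvColor
lemma foldl_color (l : List Char) :
    ∀ acc : List Char,
      l.foldl (fun colored_str char =>
        if char = '+' then colored_str ++ (pvRED ++ [char] ++ pvRESET)
        else if char = '*' then colored_str ++ (pvGREY ++ [char] ++ pvRESET)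
        else colored_str ++ [char]) acc = acc ++ l.flatMap pvColor := by
  induction l with
  | nil => intro acc; simp
  | cons c t ih =>
      intro acc
      simp only [List.foldl_cons, List.flatMap_cons]
      rw [ih]
      by_cases h1 : c = '+'
      · simp [pvColor, h1]
      · by_cases h2 : c = '*' <;> simp [pvColor, h1, h2]

-- the grey pass applied to a red-pass output fragment gives A's coloring
lemma sub_color (c : Char) :
    pvSub '*' (pvGREY ++ ['*'] ++ pvRESET)
      (if c = '+' then pvRED ++ ['+'] ++ pvRESET else [c]) = pvColor c := by
  by_cases h1 : c = '+'
  · subst h1; decide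
  · by_cases h2 : c = '*'
    · subst h2; simp [pvSub, pvColor]
    · simp [pvSub, pvColor, h1, h2]

-- the two replace passes compose to the flatMap of pvColor
lemma two_pass (l : List Char) :
    pvSub '*' (pvGREY ++ ['*'] ++ pvRESET)
      (pvSub '+' (pvRED ++ ['+'] ++ pvRESET) l) = l.flatMap pvColor := by
  unfold pvSub
  rw [List.flatMap_assoc]
  refine List.flatMap_congr ?_
  intro c _
  simpa using sub_color c

-- ===== VERDICT (by name: the statement is the Claim_ definition above) =====
theorem apply_color_spec : Claim_equal_apply_color := by
  intro s _
  unfold Spec_apply_color apply_color apply_color_alt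
  apply String.ofList_eq.mpr
  rw [PySem.Str.toList_replace, PySem.Str.toList_replace]
  rw [show ("+" : String).toList = ['+'] from rfl,
      show ("*" : String).toList = ['*'] from rfl,
      show ("\x1B[31m+\x1B[0m" : String).toList = pvRED ++ ['+'] ++ pvRESET from rfl,
      show ("\x1B[90m*\x1B[0m" : String).toList = pvGREY ++ ['*'] ++ pvRESET from rfl]
  rw [replace_single, replace_single, two_pass, foldl_color]
  simp
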